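-- pv_equiv track=rewrite | github.com/beauthi/contests | Code Jam/2020/round 1C/overexcited-fan.py | position_map
-- ===== SOURCE A (Python) =====
-- def position_map(x, y, moves):
--     positions = [(x, y)]
--     i, j = x, y
--     for move in moves:
--         if move == "S":
--             j = j - 1
--         if move == "N":
--             j = j + 1
--         if move == "E":
--             i = i + 1
--         if move == "W":
--             i = i - 1
--         positions.append((i, j))
--     return positions
-- ===== SOURCE B (Python) =====
-- def position_map(x, y, moves):
--     # Closed form per index: the position after k moves depends only on how many
--     # of each letter occur in the first k characters, so compute each output
--     # element independently from prefix letter counts (no running state).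
--     return [
--         (x + moves.count("E", 0, k) - moves.count("W", 0, k),
--          y + moves.count("N", 0, k) - moves.count("S", 0, k))
--         for k in range(len(moves) + 1)
--     ]
-- ===== Notes on version B (the rewrite author's own statement) =====
-- stated objective: alternative
-- what changed: Replaces A's stateful fused loop (running coordinates updated per move and appended) by a closed form per index: each output position k is computed independently as start plus prefix letter counts (str.count on the first k characters), with no running state.
import Mathlib
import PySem

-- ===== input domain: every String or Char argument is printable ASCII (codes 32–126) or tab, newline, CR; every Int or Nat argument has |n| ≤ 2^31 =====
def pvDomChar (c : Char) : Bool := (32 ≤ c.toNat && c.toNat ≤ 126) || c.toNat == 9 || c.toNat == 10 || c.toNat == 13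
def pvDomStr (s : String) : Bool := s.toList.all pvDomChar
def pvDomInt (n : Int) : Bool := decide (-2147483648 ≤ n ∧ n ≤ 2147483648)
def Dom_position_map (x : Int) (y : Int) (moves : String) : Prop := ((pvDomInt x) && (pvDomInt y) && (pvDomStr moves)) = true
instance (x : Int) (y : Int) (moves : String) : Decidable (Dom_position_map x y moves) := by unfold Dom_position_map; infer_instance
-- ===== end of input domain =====

-- B replaces A's stateful fused loop by a closed form per index (each output position computed
-- independently from prefix letter counts); an alternative decomposition, not faster.
-- ===== PORT A =====
def position_map (x : Int) (y : Int) (moves : String) : List (Int × Int) :=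
  let f : ((Int × Int) × List (Int × Int)) → Char → ((Int × Int) × List (Int × Int)) :=
    fun st move =>
      let i := st.1.1
      let j := st.1.2
      let j := if move = 'S' then j - 1 else j
      let j := if move = 'N' then j + 1 else j
      let i := if move = 'E' then i + 1 else i
      let i := if move = 'W' then i - 1 else i
      ((i, j), st.2 ++ [(i, j)])
  (moves.toList.foldl f ((x, y), [(x, y)])).2

-- ===== PORT B =====
-- moves.count(c, 0, k) with 0 ≤ k counts occurrences of the single character c in the first k
-- characters: exactly List.count c on (moves.toList.take k) — exact on this domain.
def position_map_alt (x : Int) (y : Int) (moves : String) : List (Int × Int) :=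
  (PySem.List.pyRange 0 ((moves.toList.length : Int) + 1) 1).map (fun k =>
    let p := moves.toList.take k.toNat
    (x + (p.count 'E' : Int) - (p.count 'W' : Int),
     y + (p.count 'N' : Int) - (p.count 'S' : Int)))

-- ===== PRECONDITION & SPEC =====
def Spec_position_map (x : Int) (y : Int) (moves : String) (out : List (Int × Int)) : Prop := out = position_map_alt x y moves
instance (x : Int) (y : Int) (moves : String) (out : List (Int × Int)) : Decidable (Spec_position_map x y moves out) := by unfold Spec_position_map; infer_instance

-- ===== CLAIM (what is proved, stated in full; the proofs are below) =====
def Claim_equal_position_map : Prop := ∀ (x : Int) (y : Int) (moves : String), Dom_position_map x y moves → Spec_position_map x y moves (position_map x y moves)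

-- ===== LEMMAS AND PROOFS =====

-- the prefix-count formula, named for the proofs
def pvG (x y : Int) (p : List Char) : Int × Int :=
  (x + (p.count 'E' : Int) - (p.count 'W' : Int),
   y + (p.count 'N' : Int) - (p.count 'S' : Int))

-- A's nested-if step applied to (x, y) is pvG over the one-character prefix shifted start
theorem pvG_cons (x y : Int) (c : Char) (p : List Char) :
    pvG x y (c :: p)
      = pvG (if c = 'W' then (if c = 'E' then x + 1 else x) - 1 else if c = 'E' then x + 1 else x)
            (if c = 'N' then (if c = 'S' then y - 1 else y) + 1 else if c = 'S' then y - 1 else y) p := by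
  by_cases hN : c = 'N' <;> by_cases hS : c = 'S' <;> by_cases hE : c = 'E' <;> by_cases hW : c = 'W' <;>
    simp_all [pvG, Prod.ext_iff] <;> omega

-- the A-side positions after each nonempty prefix, as a recursion
def pvAPos : List Char → Int → Int → List (Int × Int)
  | [], _, _ => []
  | c :: cs, x, y =>
      let x' := if c = 'W' then (if c = 'E' then x + 1 else x) - 1 else if c = 'E' then x + 1 else x
      let y' := if c = 'N' then (if c = 'S' then y - 1 else y) + 1 else if c = 'S' then y - 1 else y
      (x', y') :: pvAPos cs x' y'

-- A's foldl appends exactly pvAPos to the accumulator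
theorem pvLoop (cs : List Char) (x y : Int) (acc : List (Int × Int)) :
    (cs.foldl (fun st move =>
      let i := st.1.1
      let j := st.1.2
      let j := if move = 'S' then j - 1 else j
      let j := if move = 'N' then j + 1 else j
      let i := if move = 'E' then i + 1 else i
      let i := if move = 'W' then i - 1 else i
      ((i, j), st.2 ++ [(i, j)])) ((x, y), acc)).2
    = acc ++ pvAPos cs x y := by
  induction cs generalizing x y acc with
  | nil => simp [pvAPos]
  | cons c cs ih =>
    simp only [List.foldl_cons, pvAPos]
    rw [ih]
    simp

-- the cons-list of A-side positions equals the map of pvG over prefix lengths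
theorem pvPos_eq_map (cs : List Char) (x y : Int) :
    (x, y) :: pvAPos cs x y
      = (List.range (cs.length + 1)).map (fun k => pvG x y (cs.take k)) := by
  induction cs generalizing x y with
  | nil => simp [pvAPos, pvG]
  | cons c cs ih =>
    have hrange : List.range (cs.length + 1 + 1)
        = 0 :: (List.range (cs.length + 1)).map Nat.succ := List.range_succ_eq_map
    simp only [List.length_cons, hrange, List.map_cons, List.map_map]
    have h0 : pvG x y ((c :: cs).take 0) = (x, y) := by simp [pvG]
    have hk : ((fun k => pvG x y ((c :: cs).take k)) ∘ Nat.succ)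
        = fun k => pvG
            (if c = 'W' then (if c = 'E' then x + 1 else x) - 1 else if c = 'E' then x + 1 else x)
            (if c = 'N' then (if c = 'S' then y - 1 else y) + 1 else if c = 'S' then y - 1 else y)
            (cs.take k) := by
      funext k
      simp only [Function.comp, List.take_succ_cons]
      exact pvG_cons x y c (cs.take k)
    rw [h0, hk, ← ih]
    simp [pvAPos]

-- ===== VERDICT (by name: the statement is the Claim_ definition above) =====
theorem position_map_spec : Claim_equal_position_map := by
  intro x y moves _
  show _ = _
  unfold position_map position_map_alt
  simp only
  rw [pvLoop moves.toList x y [(x, y)], List.singleton_append,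
    PySem.List.pyRange_one, pvPos_eq_map]
  have : ((moves.toList.length : Int) + 1 - 0).toNat = moves.toList.length + 1 := by omega
  rw [this, List.map_map]
  apply List.map_congr_left
  intro k hk
  simp [pvG]
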